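-- pv_equiv track=rewrite | github.com/OleksaVasylenko/ifa-fetcher | src/ifa_fetcher/main.py | search_ingredient
-- ===== SOURCE A (Python) =====
-- from contextlib import suppress
--
-- def search_ingredient(
--     ingredient: str, ingredient_sample: list[str]
-- ) -> tuple[str, list[str]]:
--     folded_ingredient_sample = [i.casefold() for i in ingredient_sample]
--     folded_ingredient = ingredient.casefold()
--
--     with suppress(ValueError):
--         idx = folded_ingredient_sample.index(folded_ingredient)
--         return ingredient_sample[idx], []
--
--     match = []
--     for idx, item in enumerate(folded_ingredient_sample):
--         for part in folded_ingredient.split():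
--             if part in item:
--                 match.append(ingredient_sample[idx])
--                 continue
--     return "", match
-- ===== SOURCE B (Python) =====
-- def search_ingredient(
--     ingredient: str, ingredient_sample: list[str]
-- ) -> tuple[str, list[str]]:
--     folded_ingredient = ingredient.casefold()
--     parts = folded_ingredient.split()
--     exact = None
--     matches = []
--     for item in ingredient_sample:
--         folded_item = item.casefold()
--         if exact is None and folded_item == folded_ingredient:
--             exact = item
--         for part in parts:
--             if part in folded_item:
--                 matches.append(item)
--     if exact is not None:
--         return exact, []
--     return "", matches
-- ===== Notes on version B (the rewrite author's own statement) =====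
-- stated objective: faster
-- what changed: Replaces A's try/except .index early-return plus a separate index-based nested fallback scan (which re-splits the query on every item) with one single pass that splits the query once, tracks the first exactly-matching item and accumulates substring matches simultaneously, deciding the result after the loop.
import Mathlib
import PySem

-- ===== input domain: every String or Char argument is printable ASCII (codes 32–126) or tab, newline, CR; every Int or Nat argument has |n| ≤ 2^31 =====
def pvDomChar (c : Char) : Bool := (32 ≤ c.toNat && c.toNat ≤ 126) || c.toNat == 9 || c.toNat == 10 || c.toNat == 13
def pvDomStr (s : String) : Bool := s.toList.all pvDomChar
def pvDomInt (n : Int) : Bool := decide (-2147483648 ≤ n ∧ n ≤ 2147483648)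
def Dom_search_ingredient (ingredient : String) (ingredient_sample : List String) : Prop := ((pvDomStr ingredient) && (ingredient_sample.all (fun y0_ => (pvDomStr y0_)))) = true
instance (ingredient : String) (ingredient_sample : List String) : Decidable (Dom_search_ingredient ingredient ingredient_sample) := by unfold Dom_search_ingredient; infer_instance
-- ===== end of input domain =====

-- B merges A's try/except .index early-return and its separate index-based fallback scan into
-- one pass tracking the first exact item and the substring matches together (objective: simpler).
-- casefold is ported as PySem.Str.lower: exact on the ASCII domain Dom_search_ingredient.

-- ===== PORT A =====
def search_ingredient (ingredient : String) (ingredient_sample : List String) : String × List String :=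
  let folded_ingredient_sample := ingredient_sample.map PySem.Str.lower
  let folded_ingredient := PySem.Str.lower ingredient
  match PySem.List.index? folded_ingredient_sample folded_ingredient with
  | some idx => ((PySem.List.pyGet? ingredient_sample (idx : Int)).getD "", [])
  | none =>
      let m := (PySem.List.enumerate folded_ingredient_sample 0).foldl
        (fun acc p =>
          (PySem.Str.split₀ folded_ingredient).foldl
            (fun acc part =>
              if PySem.Str.isIn part p.2 then
                acc ++ [(PySem.List.pyGet? ingredient_sample p.1).getD ""]
              else acc) acc) []
      ("", m)

-- ===== PORT B =====
-- the body of B's single loop (one iteration: update the exact item, extend the matches)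
def pvStepB (folded_ingredient : String) (st : Option String × List String) (item : String) :
    Option String × List String :=
  let folded_item := PySem.Str.lower item
  (match st.1 with
    | none => if folded_item == folded_ingredient then some item else none
    | some e => some e,
   (PySem.Str.split₀ folded_ingredient).foldl
     (fun acc part => if PySem.Str.isIn part folded_item then acc ++ [item] else acc) st.2)

def search_ingredient_alt (ingredient : String) (ingredient_sample : List String) : String × List String :=
  let folded_ingredient := PySem.Str.lower ingredient
  let st := ingredient_sample.foldl (pvStepB folded_ingredient) (none, [])
  match st.1 with
  | some e => (e, [])
  | none => ("", st.2)

-- ===== PRECONDITION & SPEC =====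
def Spec_search_ingredient (ingredient : String) (ingredient_sample : List String) (out : String × List String) : Prop := out = search_ingredient_alt ingredient ingredient_sample
instance (ingredient : String) (ingredient_sample : List String) (out : String × List String) : Decidable (Spec_search_ingredient ingredient ingredient_sample out) := by unfold Spec_search_ingredient; infer_instance

-- ===== CLAIM (what is proved, stated in full; the proofs are below) =====
def Claim_equal_search_ingredient : Prop := ∀ (ingredient : String) (ingredient_sample : List String), Dom_search_ingredient ingredient ingredient_sample → Spec_search_ingredient ingredient ingredient_sample (search_ingredient ingredient ingredient_sample)

-- ===== LEMMAS AND PROOFS =====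

-- the per-item matches: the item, once per whitespace part of the query inside its folded form
def pvHits (fing : String) (item : String) : List String :=
  ((PySem.Str.split₀ fing).filter (fun part => PySem.Str.isIn part (PySem.Str.lower item))).map
    (fun _ => item)

theorem pvInner_eq (fing s x : String) (acc : List String) :
    (PySem.Str.split₀ fing).foldl
      (fun acc part => if PySem.Str.isIn part s then acc ++ [x] else acc) acc
    = acc ++ ((PySem.Str.split₀ fing).filter (fun part => PySem.Str.isIn part s)).map (fun _ => x) :=
  PySem.List.foldl_append_if _ _ _ _

-- first component of B's fold: the first item whose folded form equals the folded query
theorem altFold_fst (fing : String) :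
    ∀ (xs : List String) (ex0 : Option String) (ms0 : List String),
      (xs.foldl (pvStepB fing) (ex0, ms0)).1
      = match ex0 with
        | none => xs.find? (fun x => PySem.Str.lower x == fing)
        | some e => some e := by
  intro xs
  induction xs with
  | nil => intro ex0 ms0; cases ex0 <;> rfl
  | cons x t ih =>
      intro ex0 ms0
      rw [List.foldl_cons]
      cases ex0 with
      | some e => exact ih (some e) _
      | none =>
          by_cases hb : (PySem.Str.lower x == fing) = true
          · have hstep : pvStepB fing (none, ms0) x
                = (some x, (PySem.Str.split₀ fing).foldl
                    (fun acc part => if PySem.Str.isIn part (PySem.Str.lower x) then acc ++ [x] else acc) ms0) := by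
              simp only [pvStepB, hb, if_true]
            rw [hstep, ih (some x) _]
            show some x = List.find? (fun y => PySem.Str.lower y == fing) (x :: t)
            simp [hb]
          · have hb' : (PySem.Str.lower x == fing) = false := by simpa using hb
            have hstep : pvStepB fing (none, ms0) x
                = (none, (PySem.Str.split₀ fing).foldl
                    (fun acc part => if PySem.Str.isIn part (PySem.Str.lower x) then acc ++ [x] else acc) ms0) := by
              simp only [pvStepB, hb', Bool.false_eq_true, if_false]
            rw [hstep, ih none _]
            show List.find? (fun y => PySem.Str.lower y == fing) t
              = List.find? (fun y => PySem.Str.lower y == fing) (x :: t)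
            simp [hb']

-- second component of B's fold: the accumulated matches, as a flatMap of the per-item hits
theorem altFold_snd (fing : String) :
    ∀ (xs : List String) (ex0 : Option String) (ms0 : List String),
      (xs.foldl (pvStepB fing) (ex0, ms0)).2 = ms0 ++ xs.flatMap (pvHits fing) := by
  intro xs
  induction xs with
  | nil => intro ex0 ms0; simp
  | cons x t ih =>
      intro ex0 ms0
      rw [List.foldl_cons, List.flatMap_cons]
      have h2 : (pvStepB fing (ex0, ms0) x).2 = ms0 ++ pvHits fing x := by
        simp only [pvStepB]; rw [pvInner_eq]; rfl
      rw [show pvStepB fing (ex0, ms0) x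
            = ((pvStepB fing (ex0, ms0) x).1, ms0 ++ pvHits fing x) by
            rw [← h2]]
      rw [ih _ _, List.append_assoc]

-- A's fallback double loop over enumerate of the folded list equals the same flatMap of per-item hits
theorem aFold_eq (fing : String) (full : List String) :
    ∀ (rest : List String) (k : Nat) (acc : List String), full.drop k = rest →
      ((PySem.List.enumerate (rest.map PySem.Str.lower) (k : Int)).foldl
        (fun acc p =>
          (PySem.Str.split₀ fing).foldl
            (fun acc part =>
              if PySem.Str.isIn part p.2 then acc ++ [(PySem.List.pyGet? full p.1).getD ""] else acc)
            acc) acc)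
      = acc ++ rest.flatMap (pvHits fing) := by
  intro rest
  induction rest with
  | nil => intro k acc _; simp [PySem.List.enumerate_nil]
  | cons x t ih =>
      intro k acc hdrop
      have hget : full[k]? = some x := by
        rw [← List.head?_drop, hdrop, List.head?_cons]
      have hpy : (PySem.List.pyGet? full ((k : Nat) : Int)).getD "" = x := by
        rw [PySem.List.pyGet?_natCast, hget]; rfl
      rw [List.map_cons, PySem.List.enumerate_cons, List.foldl_cons, List.flatMap_cons]
      have hstep :
          (PySem.Str.split₀ fing).foldl
            (fun acc part =>
              if PySem.Str.isIn part ((k : Int), PySem.Str.lower x).2 then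
                acc ++ [(PySem.List.pyGet? full ((k : Int), PySem.Str.lower x).1).getD ""]
              else acc) acc
          = acc ++ pvHits fing x := by
        rw [show ((k : Int), PySem.Str.lower x).2 = PySem.Str.lower x from rfl,
            show ((k : Int), PySem.Str.lower x).1 = (k : Int) from rfl, hpy, pvInner_eq]
        rfl
      rw [hstep]
      have hdrop' : full.drop (k + 1) = t := by
        have := congrArg (List.drop 1) hdrop
        simpa [List.drop_drop, Nat.add_comm] using this
      have hcast : (k : Int) + 1 = ((k + 1 : Nat) : Int) := by push_cast; ring
      rw [hcast, ih (k + 1) (acc ++ pvHits fing x) hdrop', List.append_assoc]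

-- index? on the folded list, composed with lookup into the original list, is find? on the original
theorem index?_map_lower_find? (fing : String) :
    ∀ (xs : List String),
      (PySem.List.index? (xs.map PySem.Str.lower) fing).bind (fun idx => xs[idx]?)
      = xs.find? (fun x => PySem.Str.lower x == fing) := by
  intro xs
  induction xs with
  | nil => simp [PySem.List.index?]
  | cons x t ih =>
      rw [List.map_cons]
      by_cases h : PySem.Str.lower x = fing
      · rw [h, PySem.List.index?_cons_self, List.find?_cons_of_pos (by simp [h])]
        rfl
      · rw [PySem.List.index?_cons_of_ne _ h, List.find?_cons_of_neg (by simpa using h), ← ih]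
        cases hidx : PySem.List.index? (t.map PySem.Str.lower) fing <;> simp

-- ===== VERDICT (by name: the statement is the Claim_ definition above) =====
theorem search_ingredient_spec : Claim_equal_search_ingredient := by
  intro ingredient ingredient_sample _
  unfold Spec_search_ingredient search_ingredient search_ingredient_alt
  simp only
  have hkey := index?_map_lower_find? (PySem.Str.lower ingredient) ingredient_sample
  have hfst := altFold_fst (PySem.Str.lower ingredient) ingredient_sample none []
  have hsnd := altFold_snd (PySem.Str.lower ingredient) ingredient_sample none []
  cases hidx : PySem.List.index? (ingredient_sample.map PySem.Str.lower) (PySem.Str.lower ingredient) with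
  | some idx =>
      rw [hidx] at hkey
      have hlt : idx < ingredient_sample.length := by
        obtain ⟨hk, _⟩ := PySem.List.getElem_of_index?_eq_some hidx
        simpa using hk
      simp only [Option.bind_some, List.getElem?_eq_getElem hlt] at hkey
      rw [hfst, ← hkey]
      simp [List.getElem?_eq_getElem hlt]
  | none =>
      rw [hidx] at hkey
      simp only [Option.bind_none] at hkey
      rw [hfst, ← hkey]
      have hA := aFold_eq (PySem.Str.lower ingredient) ingredient_sample ingredient_sample 0 [] (by simp)
      simp only [Nat.cast_zero, List.nil_append] at hA
      have hB : (List.foldl (pvStepB (PySem.Str.lower ingredient)) (none, []) ingredient_sample).2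
          = List.flatMap (pvHits (PySem.Str.lower ingredient)) ingredient_sample := by
        rw [hsnd, List.nil_append]
      exact congrArg (Prod.mk "") (hA.trans hB.symm)
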